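-- pv_equiv track=rewrite | github.com/tiendung102k3/owos | src/gem.py | __classify_gems
-- ===== SOURCE A (Python) =====
-- def __classify_gems(inv):
--     gems = [
--         sorted(
--             [gem for gem in inv
--              if range[0] < gem < range[1]
--              ]
--         )
--         for range in
--         [(50, 58), (64, 72), (71, 79), (79, 86)]
--     ]  # Hunting, Empowering, Lucky and Special Gem Type Respectively
--
--     return gems
-- ===== SOURCE B (Python) =====
-- def __classify_gems(inv):
--     # Sort once; each bucket is then a contiguous slice of the sorted list,
--     # found by advancing boundary indices (no per-bucket filter or sort).
--     s = sorted(inv)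
--     n = len(s)
--     out = []
--     for lo, hi in ((50, 58), (64, 72), (71, 79), (79, 86)):
--         i = 0
--         while i < n and s[i] <= lo:
--             i += 1
--         j = i
--         while j < n and s[j] < hi:
--             j += 1
--         out.append(s[i:j])
--     return out
-- ===== Notes on version B (the rewrite author's own statement) =====
-- stated objective: alternative
-- what changed: Instead of A's four filter-then-sort passes, B sorts the input once and extracts each of the four buckets as a contiguous slice of the sorted list whose boundary indices are found by advancing past elements <= lo and taking elements < hi.
import Mathlib
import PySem

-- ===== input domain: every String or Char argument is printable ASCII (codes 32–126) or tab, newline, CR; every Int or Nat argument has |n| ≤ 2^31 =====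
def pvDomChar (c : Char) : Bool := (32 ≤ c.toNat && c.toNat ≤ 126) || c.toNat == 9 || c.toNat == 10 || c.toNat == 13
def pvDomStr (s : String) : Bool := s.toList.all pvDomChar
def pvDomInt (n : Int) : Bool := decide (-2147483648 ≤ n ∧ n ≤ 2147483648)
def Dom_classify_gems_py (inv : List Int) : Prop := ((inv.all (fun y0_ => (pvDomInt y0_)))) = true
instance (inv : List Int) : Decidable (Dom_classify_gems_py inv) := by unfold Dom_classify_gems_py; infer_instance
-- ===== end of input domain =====

-- B sorts the input once and cuts the sorted list into contiguous boundary slices,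
-- instead of A's four filter-then-sort passes (objective: alternative decomposition).

-- ===== PORT A =====
-- for each range, a filtering comprehension, sorted
def classify_gems_py (inv : List Int) : List (List Int) :=
  ([(50, 58), (64, 72), (71, 79), (79, 86)] : List (Int × Int)).map (fun r =>
    PySem.List.sorted (inv.filter (fun gem => decide (r.1 < gem ∧ gem < r.2))) (fun x => x) false)

-- ===== PORT B =====
-- first while loop: advance i past the prefix of elements ≤ lo (exact: on the
-- slice s[i:j] this prefix is dropped)
def dropLE (lo : Int) : List Int → List Int
  | [] => []
  | g :: t => if g ≤ lo then dropLE lo t else g :: t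

-- second while loop: j takes elements while < hi; s[i:j] is exactly this segment
def takeLT (hi : Int) : List Int → List Int
  | [] => []
  | g :: t => if g < hi then g :: takeLT hi t else []

def classify_gems_py_alt (inv : List Int) : List (List Int) :=
  let s := PySem.List.sorted inv (fun x => x) false
  ([(50, 58), (64, 72), (71, 79), (79, 86)] : List (Int × Int)).map (fun r =>
    takeLT r.2 (dropLE r.1 s))

-- ===== PRECONDITION & SPEC =====
def Spec_classify_gems_py (inv : List Int) (out : List (List Int)) : Prop := out = classify_gems_py_alt inv
instance (inv : List Int) (out : List (List Int)) : Decidable (Spec_classify_gems_py inv out) := by unfold Spec_classify_gems_py; infer_instance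

-- ===== CLAIM =====
def Claim_equal_classify_gems_py : Prop := ∀ (inv : List Int), Dom_classify_gems_py inv → Spec_classify_gems_py inv (classify_gems_py inv)

-- ===== LEMMAS AND PROOFS =====
-- On a nondecreasing list, dropping the prefix ≤ lo is filtering to > lo.
theorem dropLE_eq_filter (lo : Int) (s : List Int) (hs : s.Pairwise (· ≤ ·)) :
    dropLE lo s = s.filter (fun g => decide (lo < g)) := by
  induction s with
  | nil => rfl
  | cons a t ih =>
    rcases List.pairwise_cons.mp hs with ⟨ha, ht⟩
    by_cases h : a ≤ lo
    · simp [dropLE, h, not_lt.mpr h, ih ht]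
    · have hlt : lo < a := lt_of_not_ge h
      have : t.filter (fun g => decide (lo < g)) = t := by
        apply List.filter_eq_self.mpr
        intro b hb
        exact decide_eq_true (lt_of_lt_of_le hlt (ha b hb))
      simp [dropLE, h, hlt, this]

-- On a nondecreasing list, taking while < hi is filtering to < hi.
theorem takeLT_eq_filter (hi : Int) (s : List Int) (hs : s.Pairwise (· ≤ ·)) :
    takeLT hi s = s.filter (fun g => decide (g < hi)) := by
  induction s with
  | nil => rfl
  | cons a t ih =>
    rcases List.pairwise_cons.mp hs with ⟨ha, ht⟩
    by_cases h : a < hi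
    · simp [takeLT, h, ih ht]
    · have : t.filter (fun g => decide (g < hi)) = [] := by
        apply List.filter_eq_nil_iff.mpr
        intro b hb
        simp only [decide_eq_true_eq]
        exact not_lt.mpr (le_trans (not_lt.mp h) (ha b hb))
      simp [takeLT, h, this]

-- One bucket: B's boundary slice of the sorted list equals A's sorted filter.
theorem bucket_eq (inv : List Int) (lo hi : Int) :
    takeLT hi (dropLE lo (PySem.List.sorted inv (fun x => x) false)) =
      PySem.List.sorted (inv.filter (fun gem => decide (lo < gem ∧ gem < hi))) (fun x => x) false := by
  set s := PySem.List.sorted inv (fun x => x) false with hsdef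
  have hs : s.Pairwise (· ≤ ·) := PySem.List.sorted_pairwise inv (fun x => x) 
  have hsf : (s.filter (fun g => decide (lo < g))).Pairwise (· ≤ ·) := hs.filter _
  rw [dropLE_eq_filter lo s hs, takeLT_eq_filter hi _ hsf, List.filter_filter]
  symm
  apply PySem.List.sorted_id_eq_of_perm_of_pairwise
  · have hperm : s.Perm inv := PySem.List.sorted_perm inv (fun x => x) false
    have := hperm.filter (fun gem => decide (lo < gem ∧ gem < hi))
    refine List.Perm.trans ?_ this
    apply List.Perm.of_eq
    apply List.filter_congr
    intro g _
    simp [Bool.and_comm]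
  · exact (hs.filter _).imp (fun h => h)

-- ===== VERDICT =====
theorem classify_gems_py_spec : Claim_equal_classify_gems_py := by
  intro inv _
  unfold Spec_classify_gems_py classify_gems_py classify_gems_py_alt
  simp only [List.map]
  rw [bucket_eq, bucket_eq, bucket_eq, bucket_eq]
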